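-- pv_equiv track=rewrite | github.com/ryanlane/document-manager | backend/src/segment/segment_entries.py | extract_markdown_context
-- ===== SOURCE A (Python) =====
-- def extract_markdown_context(text: str) -> str:
--     """
--     Extract markdown headers to use as context prefix.
--     Returns the most recent headers (h1, h2, h3) as context.
--     """
--     headers = []
--     current_h1 = None
--     current_h2 = None
--     current_h3 = None
--
--     for line in text.split('\n'):
--         line = line.strip()
--         if line.startswith('# '):
--             current_h1 = line[2:].strip()
--             current_h2 = None
--             current_h3 = None
--         elif line.startswith('## '):
--             current_h2 = line[3:].strip()
--             current_h3 = None
--         elif line.startswith('### '):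
--             current_h3 = line[4:].strip()
--
--     context_parts = []
--     if current_h1:
--         context_parts.append(f"# {current_h1}")
--     if current_h2:
--         context_parts.append(f"## {current_h2}")
--     if current_h3:
--         context_parts.append(f"### {current_h3}")
--
--     return '\n'.join(context_parts)
-- ===== SOURCE B (Python) =====
-- def extract_markdown_context(text: str) -> str:
--     """Two staged passes: collect every header as (level, title), then read off
--     the last h1, the last h2 after it, and the last h3 after both, by position."""
--     headers = []
--     for raw in text.split('\n'):
--         line = raw.strip()
--         for lvl in (1, 2, 3):
--             if line.startswith('#' * lvl + ' '):
--                 headers.append((lvl, line[lvl + 1:].strip()))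
--
--     def last_index(target):
--         k = -1
--         for i, (lvl, _) in enumerate(headers):
--             if lvl == target:
--                 k = i
--         return k
--
--     k1, k2, k3 = last_index(1), last_index(2), last_index(3)
--     parts = []
--     if k1 >= 0 and headers[k1][1]:
--         parts.append('# ' + headers[k1][1])
--     if k2 > k1 and headers[k2][1]:
--         parts.append('## ' + headers[k2][1])
--     if k3 > max(k1, k2) and headers[k3][1]:
--         parts.append('### ' + headers[k3][1])
--     return '\n'.join(parts)
-- ===== Notes on version B (the rewrite author's own statement) =====
-- stated objective: alternative
-- what changed: Replaces A's single forward scan with cascading state resets by two staged passes: first collect every header as a (level, title) list, then read the answer off the last-occurrence positions of each level (last h1; last h2 only if it occurs after the last h1; last h3 only if after both).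
import Mathlib
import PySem

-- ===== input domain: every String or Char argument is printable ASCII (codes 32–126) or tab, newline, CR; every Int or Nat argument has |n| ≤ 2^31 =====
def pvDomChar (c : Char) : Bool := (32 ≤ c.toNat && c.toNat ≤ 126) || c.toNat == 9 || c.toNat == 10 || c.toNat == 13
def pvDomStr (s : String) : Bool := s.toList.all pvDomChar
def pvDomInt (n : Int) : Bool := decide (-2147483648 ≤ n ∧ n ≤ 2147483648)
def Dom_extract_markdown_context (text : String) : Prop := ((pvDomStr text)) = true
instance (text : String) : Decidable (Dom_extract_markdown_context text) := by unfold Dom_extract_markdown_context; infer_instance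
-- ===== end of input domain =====

-- B replaces A's single forward scan with cascading resets by two staged passes: collect
-- every header as (level, title), then read the answer off last-occurrence positions.

-- ===== PORT A =====
-- forward step: overwrite the current level and reset the lower ones
def pvStepA (st : Option (List Char) × Option (List Char) × Option (List Char)) (raw : List Char) :
    Option (List Char) × Option (List Char) × Option (List Char) :=
  let line := PySem.Chars.strip raw
  if PySem.Chars.startswith line ['#', ' '] then
    (some (PySem.Chars.strip (PySem.Chars.slice line (some 2) none)), none, none)
  else if PySem.Chars.startswith line ['#', '#', ' '] then
    (st.1, some (PySem.Chars.strip (PySem.Chars.slice line (some 3) none)), none)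
  else if PySem.Chars.startswith line ['#', '#', '#', ' '] then
    (st.1, st.2.1, some (PySem.Chars.strip (PySem.Chars.slice line (some 4) none)))
  else st

def extract_markdown_context (text : String) : String :=
  let st := (PySem.Chars.splitOn text.toList ['\n']).foldl pvStepA (none, none, none)
  let parts : List (List Char) :=
    (match st.1 with | some c => if c ≠ [] then [['#', ' '] ++ c] else [] | none => []) ++
    (match st.2.1 with | some c => if c ≠ [] then [['#', '#', ' '] ++ c] else [] | none => []) ++
    (match st.2.2 with | some c => if c ≠ [] then [['#', '#', '#', ' '] ++ c] else [] | none => [])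
  String.ofList (PySem.Chars.join ['\n'] parts)

-- ===== PORT B =====
-- pass 1 step: append (level, title) for each of the three prefixes the stripped line starts with
def pvCollectStep (acc : List (Nat × List Char)) (raw : List Char) : List (Nat × List Char) :=
  let line := PySem.Chars.strip raw
  [1, 2, 3].foldl (fun a lvl =>
    if PySem.Chars.startswith line (List.replicate lvl '#' ++ [' ']) then
      a ++ [(lvl, PySem.Chars.strip (PySem.Chars.slice line (some ((lvl : Int) + 1)) none))]
    else a) acc

-- pass 2: index of the last header of the given level, -1 if there is none
def pvLastIdx (headers : List (Nat × List Char)) (target : Nat) : Int :=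
  (PySem.List.enumerate headers).foldl (fun k p => if p.2.1 = target then p.1 else k) (-1)

-- headers[k][1] (guards in the caller keep k in range; getD never fires there)
def pvTitleAt (headers : List (Nat × List Char)) (k : Int) : List Char :=
  ((PySem.List.pyGet? headers k).getD (0, [])).2

def extract_markdown_context_alt (text : String) : String :=
  let headers := (PySem.Chars.splitOn text.toList ['\n']).foldl pvCollectStep []
  let k1 := pvLastIdx headers 1
  let k2 := pvLastIdx headers 2
  let k3 := pvLastIdx headers 3
  let parts : List (List Char) :=
    (if 0 ≤ k1 ∧ pvTitleAt headers k1 ≠ [] then [['#', ' '] ++ pvTitleAt headers k1] else []) ++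
    (if k1 < k2 ∧ pvTitleAt headers k2 ≠ [] then [['#', '#', ' '] ++ pvTitleAt headers k2] else []) ++
    (if max k1 k2 < k3 ∧ pvTitleAt headers k3 ≠ [] then [['#', '#', '#', ' '] ++ pvTitleAt headers k3] else [])
  String.ofList (PySem.Chars.join ['\n'] parts)

-- ===== PRECONDITION & SPEC =====
def Spec_extract_markdown_context (text : String) (out : String) : Prop := out = extract_markdown_context_alt text
instance (text : String) (out : String) : Decidable (Spec_extract_markdown_context text out) := by unfold Spec_extract_markdown_context; infer_instance

-- ===== CLAIM (what is proved, stated in full; the proofs are below) =====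
def Claim_equal_extract_markdown_context : Prop := ∀ (text : String), Dom_extract_markdown_context text → Spec_extract_markdown_context text (extract_markdown_context text)

-- ===== LEMMAS AND PROOFS =====

-- classification of one line: which (level, title) it contributes, if any
def pvHeaderOf (raw : List Char) : Option (Nat × List Char) :=
  let line := PySem.Chars.strip raw
  if PySem.Chars.startswith line ['#', ' '] then
    some (1, PySem.Chars.strip (PySem.Chars.slice line (some 2) none))
  else if PySem.Chars.startswith line ['#', '#', ' '] then
    some (2, PySem.Chars.strip (PySem.Chars.slice line (some 3) none))
  else if PySem.Chars.startswith line ['#', '#', '#', ' '] then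
    some (3, PySem.Chars.strip (PySem.Chars.slice line (some 4) none))
  else none

-- the forward step expressed on the classified header
def pvStepH (st : Option (List Char) × Option (List Char) × Option (List Char))
    (h : Nat × List Char) :
    Option (List Char) × Option (List Char) × Option (List Char) :=
  if h.1 = 1 then (some h.2, none, none)
  else if h.1 = 2 then (st.1, some h.2, none)
  else if h.1 = 3 then (st.1, st.2.1, some h.2)
  else st

-- the three prefixes are mutually exclusive
theorem pvSw_excl (line : List Char) :
    (PySem.Chars.startswith line ['#', ' '] = true → PySem.Chars.startswith line ['#', '#', ' '] = false ∧ PySem.Chars.startswith line ['#', '#', '#', ' '] = false) ∧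
    (PySem.Chars.startswith line ['#', '#', ' '] = true → PySem.Chars.startswith line ['#', '#', '#', ' '] = false) := by
  match line with
  | [] => simp [PySem.Chars.startswith]
  | [a] => simp [PySem.Chars.startswith, List.isPrefixOf]
  | a :: b :: rest =>
      simp only [PySem.Chars.startswith, List.isPrefixOf, Bool.and_eq_true, beq_iff_eq]
      constructor
      · rintro ⟨rfl, hb, -⟩
        simp [← hb]
      · rintro ⟨rfl, rfl, h2⟩
        cases rest with
        | nil => simp [List.isPrefixOf]
        | cons c rs =>
            simp only [List.isPrefixOf, Bool.and_eq_true, beq_iff_eq] at h2 ⊢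
            obtain ⟨hc, -⟩ := h2
            simp [← hc]

-- pass 1 appends exactly the classified header
theorem pvCollectStep_eq (acc : List (Nat × List Char)) (raw : List Char) :
    pvCollectStep acc raw = acc ++ (pvHeaderOf raw).toList := by
  have he := pvSw_excl (PySem.Chars.strip raw)
  unfold pvCollectStep pvHeaderOf
  simp only [List.foldl_cons, List.foldl_nil]
  norm_num [List.replicate]
  by_cases h1 : PySem.Chars.startswith (PySem.Chars.strip raw) ['#', ' '] = true
  · obtain ⟨h2, h3⟩ := he.1 h1
    simp [h1, h2, h3]
  · by_cases h2 : PySem.Chars.startswith (PySem.Chars.strip raw) ['#', '#', ' '] = true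
    · have h3 := he.2 h2
      simp [h1, h2, h3]
    · by_cases h3 : PySem.Chars.startswith (PySem.Chars.strip raw) ['#', '#', '#', ' '] = true <;>
        simp [h1, h2, h3]

-- A's step is the classified step
theorem pvStepA_eq (st : Option (List Char) × Option (List Char) × Option (List Char)) (raw : List Char) :
    pvStepA st raw = match pvHeaderOf raw with
      | some h => pvStepH st h
      | none => st := by
  unfold pvStepA pvHeaderOf
  by_cases h1 : PySem.Chars.startswith (PySem.Chars.strip raw) ['#', ' '] = true
  · simp [h1, pvStepH]
  · by_cases h2 : PySem.Chars.startswith (PySem.Chars.strip raw) ['#', '#', ' '] = true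
    · simp [h1, h2, pvStepH]
    · by_cases h3 : PySem.Chars.startswith (PySem.Chars.strip raw) ['#', '#', '#', ' '] = true <;>
        simp [h1, h2, h3, pvStepH]

theorem pvCollect_foldl (ls : List (List Char)) (acc : List (Nat × List Char)) :
    ls.foldl pvCollectStep acc = acc ++ ls.flatMap (fun r => (pvHeaderOf r).toList) := by
  induction ls generalizing acc with
  | nil => simp
  | cons x xs ih => simp [pvCollectStep_eq, ih]

theorem pvFoldA_eq (ls : List (List Char)) (st : Option (List Char) × Option (List Char) × Option (List Char)) :
    ls.foldl pvStepA st = (ls.flatMap (fun r => (pvHeaderOf r).toList)).foldl pvStepH st := by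
  induction ls generalizing st with
  | nil => simp
  | cons x xs ih =>
      simp only [List.foldl_cons, List.flatMap_cons, List.foldl_append, ih, pvStepA_eq]
      cases pvHeaderOf x <;> simp

-- titles are stable under appending a header, and read the appended one at its index
theorem pvTitleAt_append_lt (hs : List (Nat × List Char)) (x : Nat × List Char) (k : Int)
    (h0 : 0 ≤ k) (h1 : k < hs.length) :
    pvTitleAt (hs ++ [x]) k = pvTitleAt hs k := by
  have hk : k.toNat < hs.length := by omega
  unfold pvTitleAt
  rw [PySem.List.pyGet?_of_nonneg _ h0, PySem.List.pyGet?_of_nonneg _ h0,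
    List.getElem?_append_left hk]

theorem pvTitleAt_append_self (hs : List (Nat × List Char)) (x : Nat × List Char) :
    pvTitleAt (hs ++ [x]) hs.length = x.2 := by
  unfold pvTitleAt
  rw [PySem.List.pyGet?_natCast]
  simp

theorem pvLastIdx_append (hs : List (Nat × List Char)) (x : Nat × List Char) (t : Nat) :
    pvLastIdx (hs ++ [x]) t = if x.1 = t then (hs.length : Int) else pvLastIdx hs t := by
  unfold pvLastIdx
  rw [PySem.List.enumerate_append]
  simp [PySem.List.enumerate_cons, PySem.List.enumerate_nil]

theorem pvLastIdx_bounds (hs : List (Nat × List Char)) (t : Nat) :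
    -1 ≤ pvLastIdx hs t ∧ pvLastIdx hs t < hs.length := by
  induction hs using List.reverseRecOn with
  | nil => simp [pvLastIdx, PySem.List.enumerate_nil]
  | append_singleton xs x ih =>
      rw [pvLastIdx_append]
      simp only [List.length_append, List.length_cons, List.length_nil]
      split_ifs <;> constructor <;> omega

-- the positional read-off of B, as a state triple
def pvT (hs : List (Nat × List Char)) :
    Option (List Char) × Option (List Char) × Option (List Char) :=
  (if 0 ≤ pvLastIdx hs 1 then some (pvTitleAt hs (pvLastIdx hs 1)) else none,
   if pvLastIdx hs 1 < pvLastIdx hs 2 then some (pvTitleAt hs (pvLastIdx hs 2)) else none,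
   if max (pvLastIdx hs 1) (pvLastIdx hs 2) < pvLastIdx hs 3 then some (pvTitleAt hs (pvLastIdx hs 3)) else none)

-- heart: the forward fold over the headers equals the positional read-off
theorem pvFoldH_eq_T (hs : List (Nat × List Char)) :
    hs.foldl pvStepH (none, none, none) = pvT hs := by
  induction hs using List.reverseRecOn with
  | nil => simp [pvT, pvLastIdx, PySem.List.enumerate_nil]
  | append_singleton xs x ih =>
      obtain ⟨l, t⟩ := x
      obtain ⟨b1l, b1r⟩ := pvLastIdx_bounds xs 1
      obtain ⟨b2l, b2r⟩ := pvLastIdx_bounds xs 2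
      obtain ⟨b3l, b3r⟩ := pvLastIdx_bounds xs 3
      rw [List.foldl_append, List.foldl_cons, List.foldl_nil, ih]
      have A1 := pvLastIdx_append xs (l, t)
      by_cases e1 : l = 1
      · subst e1
        simp only [pvStepH, pvT, pvLastIdx_append]
        norm_num
        exact ⟨(pvTitleAt_append_self xs (1, t)).symm, fun h => absurd h (by omega),
          fun h _ => absurd h (by omega)⟩
      · by_cases e2 : l = 2
        · subst e2
          simp only [pvStepH, pvT, pvLastIdx_append]
          norm_num
          refine ⟨?_, ⟨b1r, (pvTitleAt_append_self xs (2, t)).symm⟩, ?_⟩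
          · split_ifs with h
            · rw [pvTitleAt_append_lt _ _ _ h b1r]
            · rfl
          · intro h
            have := le_max_right (pvLastIdx xs 1) ((xs.length : Int))
            omega
        · by_cases e3 : l = 3
          · subst e3
            simp only [pvStepH, pvT, pvLastIdx_append]
            norm_num
            refine ⟨?_, ?_, ?_, ?_⟩
            · split_ifs with h
              · rw [pvTitleAt_append_lt _ _ _ h b1r]
              · rfl
            · split_ifs with h
              · rw [pvTitleAt_append_lt _ _ _ (by omega) b2r]
              · rfl
            · exact ⟨b1r, b2r⟩
            · exact (pvTitleAt_append_self xs (3, t)).symm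
          · simp only [pvStepH, pvT, pvLastIdx_append, if_neg e1, if_neg e2, if_neg e3]
            refine Prod.ext ?_ (Prod.ext ?_ ?_)
            · simp only
              split_ifs with h
              · rw [pvTitleAt_append_lt _ _ _ h b1r]
              · rfl
            · simp only
              split_ifs with h
              · rw [pvTitleAt_append_lt _ _ _ (by omega) b2r]
              · rfl
            · simp only
              split_ifs with h
              · rw [pvTitleAt_append_lt _ _ _ (by omega) b3r]
              · rfl

-- assembling one part from the state equals assembling it from the guarded position
theorem pvPart (c : Prop) [Decidable c] (a p : List Char) :
    (match (if c then some a else none) with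
      | some t => if t ≠ [] then [p ++ t] else []
      | none => ([] : List (List Char))) = if c ∧ a ≠ [] then [p ++ a] else [] := by
  by_cases h : c <;> simp [h]

-- ===== VERDICT (by name: the statement is the Claim_ definition above) =====
theorem extract_markdown_context_spec : Claim_equal_extract_markdown_context := by
  intro text _
  unfold Spec_extract_markdown_context extract_markdown_context extract_markdown_context_alt
  rw [pvFoldA_eq, pvFoldH_eq_T, pvCollect_foldl, List.nil_append]
  simp only [pvT, pvPart]
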